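-- pv_equiv track=rewrite | github.com/osm1us/yolo | my_chat.py | _pick_best_model_name
-- ===== SOURCE A (Python) =====
-- from typing import Iterable, Optional
--
-- def _pick_best_model_name(model_names: Iterable[str], preferred_hint: str) -> str:
--     names = [n for n in model_names if n]
--     lowered = [(n, n.lower()) for n in names]
--
--     def find_by_all_terms(*terms: str) -> Optional[str]:
--         termsl = [t.lower() for t in terms if t]
--         for original, low in lowered:
--             if all(t in low for t in termsl):
--                 return original
--         return None
--
--     for candidate in (
--         find_by_all_terms("gemini-3", "flash"),
--         find_by_all_terms("gemini-3", "pro"),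
--         find_by_all_terms("gemini-3", "pro", "preview"),
--         find_by_all_terms(preferred_hint, "flash"),
--         find_by_all_terms(preferred_hint, "pro"),
--         find_by_all_terms("gemini-2.5", "pro"),
--         find_by_all_terms("gemini-2.5", "flash"),
--         find_by_all_terms("gemini-2.0", "flash"),
--     ):
--         if candidate:
--             return candidate
--
--     return names[0] if names else "gemini-2.5-flash"
-- ===== SOURCE B (Python) =====
-- def _pick_best_model_name(model_names, preferred_hint):
--     names = [n for n in model_names if n]
--     queries = [
--         [t.lower() for t in terms if t]
--         for terms in (
--             ("gemini-3", "flash"),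
--             ("gemini-3", "pro"),
--             ("gemini-3", "pro", "preview"),
--             (preferred_hint, "flash"),
--             (preferred_hint, "pro"),
--             ("gemini-2.5", "pro"),
--             ("gemini-2.5", "flash"),
--             ("gemini-2.0", "flash"),
--         )
--     ]
--     nq = len(queries)
--     best_name = None
--     best_score = nq
--     for n in names:
--         low = n.lower()
--         score = next((i for i, q in enumerate(queries) if all(t in low for t in q)), nq)
--         if score < best_score:
--             best_score = score
--             best_name = n
--     if best_name is not None:
--         return best_name
--     return names[0] if names else "gemini-2.5-flash"
-- ===== Notes on version B (the rewrite author's own statement) =====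
-- stated objective: alternative
-- what changed: A makes eight priority-ordered find-calls, each scanning the whole name list for the first name matching all terms; B builds the query list once and makes a single pass over the names, computing each name's best (smallest) query index and keeping the argmin with strict-< earliest-name tie-breaking.
import Mathlib
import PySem

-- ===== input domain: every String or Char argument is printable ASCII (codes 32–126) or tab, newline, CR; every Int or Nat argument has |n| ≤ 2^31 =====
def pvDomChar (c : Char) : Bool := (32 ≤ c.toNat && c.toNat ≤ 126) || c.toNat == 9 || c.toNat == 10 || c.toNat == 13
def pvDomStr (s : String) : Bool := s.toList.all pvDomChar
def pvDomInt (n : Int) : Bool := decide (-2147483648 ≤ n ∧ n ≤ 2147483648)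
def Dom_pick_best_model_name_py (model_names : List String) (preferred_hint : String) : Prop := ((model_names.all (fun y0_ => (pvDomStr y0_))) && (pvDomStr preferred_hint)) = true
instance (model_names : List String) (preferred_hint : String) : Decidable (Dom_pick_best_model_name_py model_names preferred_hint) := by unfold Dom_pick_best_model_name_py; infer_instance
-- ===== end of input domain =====

-- B replaces A's priority-ordered sweep of eight find-calls (each scanning the names) by a
-- single pass over the names that keeps the argmin of each name's best query index (objective: alternative).

-- ===== PORT A =====

-- the 'for original, low in lowered: if all(...): return original' loop of find_by_all_terms
def pvAFindGo (termsl : List String) : List (String × String) → Option String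
  | [] => none
  | (original, low) :: rest =>
      if termsl.all (fun t => PySem.Str.isIn t low) then some original
      else pvAFindGo termsl rest

-- 'for candidate in (...): if candidate: return candidate' then the final fallback
def pvAFirstTruthy : List (Option String) → String → String
  | [], dflt => dflt
  | c :: rest, dflt =>
      match c with
      | some s => if s ≠ "" then s else pvAFirstTruthy rest dflt
      | none => pvAFirstTruthy rest dflt

def pick_best_model_name_py (model_names : List String) (preferred_hint : String) : String :=
  let names := model_names.filter (fun n => n ≠ "")
  let lowered := names.map (fun n => (n, PySem.Str.lower n))
  let find := fun (terms : List String) =>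
    pvAFindGo ((terms.filter (fun t => t ≠ "")).map PySem.Str.lower) lowered
  let candidates : List (Option String) :=
    [ find ["gemini-3", "flash"],
      find ["gemini-3", "pro"],
      find ["gemini-3", "pro", "preview"],
      find [preferred_hint, "flash"],
      find [preferred_hint, "pro"],
      find ["gemini-2.5", "pro"],
      find ["gemini-2.5", "flash"],
      find ["gemini-2.0", "flash"] ]
  pvAFirstTruthy candidates (match names with | [] => "gemini-2.5-flash" | n :: _ => n)

-- ===== PORT B =====

-- score = next((i for i, q in enumerate(queries) if all(t in low for t in q)), nq)
def pvBScore (queries : List (List String)) (low : String) : Nat :=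
  queries.findIdx (fun q => q.all (fun t => PySem.Str.isIn t low))

-- the single 'for n in names' loop with accumulator (best_score, best_name)
def pvBLoop (queries : List (List String)) : List String → Nat × Option String → Nat × Option String
  | [], acc => acc
  | n :: rest, (bs, bn) =>
      let s := pvBScore queries (PySem.Str.lower n)
      if s < bs then pvBLoop queries rest (s, some n)
      else pvBLoop queries rest (bs, bn)

def pick_best_model_name_py_alt (model_names : List String) (preferred_hint : String) : String :=
  let names := model_names.filter (fun n => n ≠ "")
  let queries :=
    ([ ["gemini-3", "flash"],
       ["gemini-3", "pro"],
       ["gemini-3", "pro", "preview"],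
       [preferred_hint, "flash"],
       [preferred_hint, "pro"],
       ["gemini-2.5", "pro"],
       ["gemini-2.5", "flash"],
       ["gemini-2.0", "flash"] ] : List (List String)).map
      (fun terms => (terms.filter (fun t => t ≠ "")).map PySem.Str.lower)
  match (pvBLoop queries names (queries.length, none)).2 with
  | some n => n
  | none => match names with | [] => "gemini-2.5-flash" | n :: _ => n

-- ===== PRECONDITION & SPEC =====
def Spec_pick_best_model_name_py (model_names : List String) (preferred_hint : String) (out : String) : Prop := out = pick_best_model_name_py_alt model_names preferred_hint
instance (model_names : List String) (preferred_hint : String) (out : String) : Decidable (Spec_pick_best_model_name_py model_names preferred_hint out) := by unfold Spec_pick_best_model_name_py; infer_instance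

-- ===== CLAIM (what is proved, stated in full; the proofs are below) =====
def Claim_equal_pick_best_model_name_py : Prop := ∀ (model_names : List String) (preferred_hint : String), Dom_pick_best_model_name_py model_names preferred_hint → Spec_pick_best_model_name_py model_names preferred_hint (pick_best_model_name_py model_names preferred_hint)

-- ===== LEMMAS AND PROOFS =====

-- whether name n matches query q (terms already lowercased)
def pvMatch (q : List String) (n : String) : Bool :=
  q.all (fun t => PySem.Str.isIn t (PySem.Str.lower n))

-- common reference semantics: first query (in order) that some name matches -> first such name
def pvRef : List (List String) → List String → Option String
  | [], _ => none
  | q :: qs, names =>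
      match names.find? (pvMatch q) with
      | some n => some n
      | none => pvRef qs names

theorem pvAFindGo_eq (termsl : List String) (names : List String) :
    pvAFindGo termsl (names.map (fun n => (n, PySem.Str.lower n))) =
      names.find? (pvMatch termsl) := by
  induction names with
  | nil => rfl
  | cons n rest ih =>
      rw [List.map_cons]
      cases h : (termsl.all fun t => PySem.Str.isIn t (PySem.Str.lower n)) with
      | true =>
          rw [List.find?_cons_of_pos (show pvMatch termsl n = true from h)]
          simp only [pvAFindGo]
          rw [h]
          simp
      | false =>
          have h' : ¬ pvMatch termsl n = true := by unfold pvMatch; rw [h]; simp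
          rw [List.find?_cons_of_neg h']
          simp only [pvAFindGo]
          rw [h]
          simpa using ih

theorem pvAFirstTruthy_eq (qs : List (List String)) (names : List String)
    (hne : ∀ n ∈ names, n ≠ "") (dflt : String) :
    pvAFirstTruthy (qs.map (fun q => names.find? (pvMatch q))) dflt =
      (pvRef qs names).getD dflt := by
  induction qs with
  | nil => rfl
  | cons q rest ih =>
      simp only [List.map_cons, pvAFirstTruthy, pvRef]
      cases hfind : names.find? (pvMatch q) with
      | none => simpa using ih
      | some n =>
          have hn : n ∈ names := List.mem_of_find?_eq_some hfind
          simp [hne n hn]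

theorem pvBLoop_zero (qs : List (List String)) (names : List String) (bn : Option String) :
    pvBLoop qs names (0, bn) = (0, bn) := by
  induction names with
  | nil => rfl
  | cons n rest ih => simp [pvBLoop, ih]

theorem pvBScore_cons (q : List String) (qs : List (List String)) (low : String) :
    pvBScore (q :: qs) low =
      if q.all (fun t => PySem.Str.isIn t low) then 0 else pvBScore qs low + 1 := by
  simp [pvBScore, List.findIdx_cons]

theorem pvBLoop_found (q : List String) (qs : List (List String)) :
    ∀ (names : List String) (bs : Nat) (bn : Option String) (n₀ : String),
      1 ≤ bs → names.find? (pvMatch q) = some n₀ →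
      (pvBLoop (q :: qs) names (bs, bn)).2 = some n₀ := by
  intro names
  induction names with
  | nil => intro bs bn n₀ _ h; simp at h
  | cons n rest ih =>
      intro bs bn n₀ hbs hfind
      cases hm : (q.all fun t => PySem.Str.isIn t (PySem.Str.lower n)) with
      | true =>
          rw [List.find?_cons_of_pos (show pvMatch q n = true from hm)] at hfind
          injection hfind with hEq
          subst hEq
          have hs : pvBScore (q :: qs) (PySem.Str.lower n) = 0 := by
            rw [pvBScore_cons, hm]; simp
          simp only [pvBLoop, hs]
          rw [if_pos (by omega), pvBLoop_zero]
      | false =>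
          have hm' : ¬ pvMatch q n = true := by unfold pvMatch; rw [hm]; simp
          rw [List.find?_cons_of_neg hm'] at hfind
          have hs : pvBScore (q :: qs) (PySem.Str.lower n) =
              pvBScore qs (PySem.Str.lower n) + 1 := by
            rw [pvBScore_cons, hm]; simp
          simp only [pvBLoop, hs]
          split
          · exact ih _ _ _ (by omega) hfind
          · exact ih _ _ _ hbs hfind

theorem pvBLoop_shift (q : List String) (qs : List (List String)) :
    ∀ (names : List String), (∀ n ∈ names, pvMatch q n = false) →
      ∀ (bs : Nat) (bn : Option String),
      pvBLoop (q :: qs) names (bs + 1, bn) =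
        ((pvBLoop qs names (bs, bn)).1 + 1, (pvBLoop qs names (bs, bn)).2) := by
  intro names
  induction names with
  | nil => intro _ bs bn; rfl
  | cons n rest ih =>
      intro hno bs bn
      have hn : pvMatch q n = false := hno n (by simp)
      have hs : pvBScore (q :: qs) (PySem.Str.lower n) =
          pvBScore qs (PySem.Str.lower n) + 1 := by
        rw [pvBScore_cons, show (q.all fun t => PySem.Str.isIn t (PySem.Str.lower n)) = false from hn]
        simp
      have hrest : ∀ m ∈ rest, pvMatch q m = false := fun m hm => hno m (List.mem_cons_of_mem _ hm)
      simp only [pvBLoop, hs]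
      by_cases hlt : pvBScore qs (PySem.Str.lower n) < bs
      · rw [if_pos (by omega), if_pos hlt, ih hrest]
      · rw [if_neg (by omega), if_neg hlt, ih hrest]

theorem pvBLoop_eq_pvRef (qs : List (List String)) (names : List String) :
    (pvBLoop qs names (qs.length, none)).2 = pvRef qs names := by
  induction qs with
  | nil =>
      rw [show ([] : List (List String)).length = 0 from rfl, pvBLoop_zero]; rfl
  | cons q rest ih =>
      cases hfind : names.find? (pvMatch q) with
      | some n₀ =>
          simp only [pvRef, hfind]
          exact pvBLoop_found q rest names _ none n₀ (by simp) hfind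
      | none =>
          have hno : ∀ n ∈ names, pvMatch q n = false := by
            intro n hn
            exact Bool.eq_false_iff.mpr (List.find?_eq_none.mp hfind n hn)
          simp only [pvRef, hfind, List.length_cons]
          rw [pvBLoop_shift q rest names hno rest.length none]
          exact ih

theorem pvMain (qs : List (List String)) (names : List String)
    (hne : ∀ n ∈ names, n ≠ "") (dflt : String) :
    pvAFirstTruthy (qs.map (fun q => pvAFindGo q (names.map (fun n => (n, PySem.Str.lower n))))) dflt =
      (match (pvBLoop qs names (qs.length, none)).2 with
       | some n => n
       | none => dflt) := by
  have h1 : (qs.map (fun q => pvAFindGo q (names.map (fun n => (n, PySem.Str.lower n))))) =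
      qs.map (fun q => names.find? (pvMatch q)) :=
    List.map_congr_left (fun q _ => pvAFindGo_eq q names)
  rw [h1, pvAFirstTruthy_eq qs names hne dflt, pvBLoop_eq_pvRef]
  cases pvRef qs names <;> rfl

-- ===== VERDICT (by name: the statement is the Claim_ definition above) =====
theorem pick_best_model_name_py_spec : Claim_equal_pick_best_model_name_py := by
  intro model_names preferred_hint _
  unfold Spec_pick_best_model_name_py
  simp only [pick_best_model_name_py, pick_best_model_name_py_alt]
  have key := pvMain
      (([ ["gemini-3","flash"], ["gemini-3","pro"], ["gemini-3","pro","preview"],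
          [preferred_hint,"flash"], [preferred_hint,"pro"],
          ["gemini-2.5","pro"], ["gemini-2.5","flash"], ["gemini-2.0","flash"] ] : List (List String)).map
        (fun terms => (terms.filter (fun t => t ≠ "")).map PySem.Str.lower))
      (model_names.filter (fun n => n ≠ ""))
      (by intro n hn; have := List.mem_filter.mp hn; simpa using this.2)
      (match model_names.filter (fun n => n ≠ "") with | [] => "gemini-2.5-flash" | n :: _ => n)
  simp only [List.map_cons, List.map_nil] at key ⊢
  exact key
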